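-- pv_equiv track=rewrite | github.com/hezx6/HADES | common.py | ten2
-- ===== SOURCE A (Python) =====
-- def ten2(n, x, k):
--     """
--     输入（十进制数,目标进制数<99,输出位数）
--     输出的数值为列表形式，每个数字之间用逗号隔开
--     """
--     # n为待转换的十进制数，x为机制，取值为2-16
--     a = [i for i in range(100)]
--     b = []
--     while True:
--         s = n // x  # 商
--         y = n % x  # 余数
--         b = b + [y]
--         if s == 0:
--             break
--         n = s
--     b.reverse()
--     temp = [a[i] for i in b]
--     while True:
--         if len(temp) < k:
--             temp.insert(0, 0)
--         else:
--             break
--     return temp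
-- ===== SOURCE B (Python) =====
-- def ten2(n, x, k):
--     # number of base-x digits of n (at least 1)
--     m = 1
--     while x ** m <= n:
--         m += 1
--     total = max(m, k)
--     # zero padding up front, then one high-to-low pass over the real digit positions
--     return [0] * (total - m) + [(n // x ** p) % x for p in range(m - 1, -1, -1)]
-- ===== Notes on version B (the rewrite author's own statement) =====
-- stated objective: alternative
-- what changed: Instead of collecting remainders LSB-first in a repeated-division loop, reversing, mapping through a 0..99 lookup table and prepending zeros one insert(0) at a time, B counts the digits m via powers of x, prepads with [0]*(total-m) and emits the digits in one high-to-low pass with (n // x**p) % x.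
-- outside the precondition, e.g. on ten2(607, 200, 0): A returns [3, 7], B returns [3, 7]; on ten2(5, -2, 0): A returns [99, 99, 99, 99], B returns [-1, -1, -1, -1]; on ten2(-3, 2, 0): A does not finish within the time limit, B returns [1]
import Mathlib
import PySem

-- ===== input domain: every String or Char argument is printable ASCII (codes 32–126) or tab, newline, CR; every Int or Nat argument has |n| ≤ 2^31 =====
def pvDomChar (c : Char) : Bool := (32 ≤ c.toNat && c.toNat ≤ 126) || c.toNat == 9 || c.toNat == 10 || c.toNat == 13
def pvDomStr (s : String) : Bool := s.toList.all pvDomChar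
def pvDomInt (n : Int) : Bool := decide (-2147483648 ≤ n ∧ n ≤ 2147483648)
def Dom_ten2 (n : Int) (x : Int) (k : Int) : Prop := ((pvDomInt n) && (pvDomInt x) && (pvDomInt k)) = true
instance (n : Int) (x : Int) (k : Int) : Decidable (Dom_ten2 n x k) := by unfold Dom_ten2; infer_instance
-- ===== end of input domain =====

-- B replaces A's repeated-division loop + reverse + lookup-table map + insert(0,0) padding loop by
-- a digit count via powers of x, a replicate prepad and one high-to-low positional pass (n // x**p) % x.

-- ===== PORT A =====
-- A's 'while True' division loop, collecting remainders LSB-first; the fuel n.toNat+1 is only a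
-- totality guard — on every input admitted by Pre_ten2 the loop exits before the fuel runs out.
def ten2DivLoop : Nat → Int → Int → List Int
  | 0, n, x => [PySem.Int.mod n x]
  | fuel + 1, n, x =>
    let s := PySem.Int.floordiv n x
    let y := PySem.Int.mod n x
    if s = 0 then [y] else y :: ten2DivLoop fuel s x

-- A's padding loop 'while len(temp) < k: temp.insert(0, 0)'
def ten2Pad (k : Int) (temp : List Int) : List Int :=
  if (temp.length : Int) < k then ten2Pad k (0 :: temp) else temp
  termination_by (k - temp.length).toNat
  decreasing_by simp at *; omega

def ten2 (n : Int) (x : Int) (k : Int) : List Int :=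
  let a : List Int := PySem.List.pyRange 0 100 1      -- a = [i for i in range(100)]
  let b := ten2DivLoop (n.toNat + 1) n x
  let b2 := b.reverse
  -- temp = [a[i] for i in b]; a[i] ported with pyGetD (total form of Python indexing, exact under
  -- Pre_ten2, where every digit i satisfies 0 ≤ i < x ≤ 100 = len(a))
  let temp := b2.map (fun i => PySem.List.pyGetD a i 0)
  ten2Pad k temp

-- ===== PORT B =====
-- B's 'while x ** m <= n: m += 1'; fuel n.toNat+1 is a totality guard only (enough under Pre_ten2)
def ten2AltCount : Nat → Int → Int → Int → Int
  | 0, _, _, m => m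
  | fuel + 1, n, x, m => if x ^ m.toNat ≤ n then ten2AltCount fuel n x (m + 1) else m

def ten2_alt (n : Int) (x : Int) (k : Int) : List Int :=
  let m := ten2AltCount (n.toNat + 1) n x 1
  let total := max m k
  -- [0] * (total - m): Python list repetition is empty for a non-positive count = .toNat clamp;
  -- [(n // x ** p) % x for p in range(m - 1, -1, -1)]; x ** p = x ^ p.toNat (p ≥ 0 on this range)
  List.replicate (total - m).toNat 0 ++
    (PySem.List.pyRange (m - 1) (-1) (-1)).map
      (fun p => PySem.Int.mod (PySem.Int.floordiv n (x ^ p.toNat)) x)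

-- ===== PRECONDITION & SPEC =====
-- Pre_ is the function's natural domain (nonnegative n, base ≥ 2, remainders within the 0..99
-- lookup table): outside it A diverges (n < 0, or x ∈ {0,1} — x = 0 raises ZeroDivisionError),
-- raises IndexError (x > 100 once a remainder reaches 100), or (x ≤ -2) reads the table through
-- Python negative-index wraparound; for n < 100 every remainder is below 100, so any x ≥ 2 is fine.
def Pre_ten2 (n : Int) (x : Int) (k : Int) : Prop := 0 ≤ n ∧ 2 ≤ x ∧ (x ≤ 100 ∨ n < 100)
instance (n : Int) (x : Int) (k : Int) : Decidable (Pre_ten2 n x k) := by unfold Pre_ten2; infer_instance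
def pvWitness_ten2 : Int × Int × Int := (5, 2, 4)
def Spec_ten2 (n : Int) (x : Int) (k : Int) (out : List Int) : Prop := out = ten2_alt n x k
instance (n : Int) (x : Int) (k : Int) (out : List Int) : Decidable (Spec_ten2 n x k out) := by unfold Spec_ten2; infer_instance

-- ===== CLAIM (what is proved, stated in full; the proofs are below) =====
def Claim_equal_ten2 : Prop := ∀ (n : Int) (x : Int) (k : Int), Dom_ten2 n x k → Pre_ten2 n x k → Spec_ten2 n x k (ten2 n x k)

-- ===== LEMMAS AND PROOFS =====

-- LSB-first digit list that A's division loop produces (and whose positional reading B emits)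
def lsbD (X N : Nat) : List Nat := if N = 0 then [0] else Nat.digits X N

theorem lsbD_ne_nil (X N : Nat) : lsbD X N ≠ [] := by
  unfold lsbD; split <;> simp [Nat.digits_ne_nil_iff_ne_zero, *]

theorem lsbD_getD (X N : Nat) (hX : 2 ≤ X) (i : Nat) :
    (lsbD X N).getD i 0 = N / X ^ i % X := by
  unfold lsbD
  split
  · subst ‹N = 0›; cases i <;> simp
  · exact Nat.getD_digits N i hX

theorem lsbD_lt (X N : Nat) (hX : 2 ≤ X) {d : Nat} (hd : d ∈ lsbD X N) : d < X := by
  unfold lsbD at hd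
  split at hd
  · simp at hd; omega
  · exact Nat.digits_lt_base hX hd

theorem lt_pow_len_lsbD (X N : Nat) (hX : 2 ≤ X) : N < X ^ (lsbD X N).length := by
  unfold lsbD
  split
  · subst ‹N = 0›; simp; omega
  · exact Nat.lt_base_pow_length_digits (by omega)

theorem pow_le_of_lt_len (X N j : Nat) (hX : 2 ≤ X) (hj1 : 1 ≤ j)
    (hj : j < (lsbD X N).length) : X ^ j ≤ N := by
  unfold lsbD at hj
  split at hj
  · simp at hj; omega
  · exact (Nat.lt_digits_length_iff (by omega) N).mp hj

theorem divLoop_eq (X : Nat) (hX : 2 ≤ X) :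
    ∀ (N fuel : Nat), N < fuel →
      ten2DivLoop fuel (N : Int) (X : Int) = (lsbD X N).map (fun d : Nat => (d : Int)) := by
  intro N
  induction N using Nat.strong_induction_on with
  | _ N ih =>
    intro fuel hfuel
    match fuel with
    | f + 1 =>
      show (if PySem.Int.floordiv (N : Int) (X : Int) = 0 then _ else _) = _
      rw [PySem.Int.floordiv_natCast, PySem.Int.mod_natCast]
      by_cases h0 : N = 0
      · subst h0; simp [lsbD]
      by_cases hq : N / X = 0
      · have hNX : N < X := (Nat.div_eq_zero_iff_lt (by omega)).mp hq
        simp only [hq, Nat.cast_zero]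
        rw [show lsbD X N = [N % X] by
          unfold lsbD
          rw [if_neg h0, Nat.digits_def' (by omega : 1 < X) (by omega), hq, Nat.digits_zero]]
        simp
      · rw [if_neg (by exact_mod_cast hq)]
        rw [ih (N / X) (Nat.div_lt_self (by omega) (by omega)) f (by
          have := Nat.div_lt_self (show 0 < N by omega) (show 1 < X by omega); omega)]
        rw [show lsbD X N = N % X :: lsbD X (N / X) by
          unfold lsbD
          rw [if_neg h0, if_neg hq, Nat.digits_def' (by omega : 1 < X) (by omega)]]
        simp

theorem pad_eq (k : Int) (t : List Int) :
    ten2Pad k t = List.replicate (k - t.length).toNat 0 ++ t := by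
  fun_induction ten2Pad k t with
  | case1 t h ih =>
    rw [ih]
    have h1 : (k - t.length).toNat = (k - (0 :: t).length).toNat + 1 := by
      simp at *; omega
    rw [h1, List.replicate_succ']
    simp
  | case2 t h =>
    have : (k - t.length).toNat = 0 := by omega
    simp [this]

theorem count_eq (X L' : Nat) (hX : 2 ≤ X) (N : Nat) (hN : N < X ^ L')
    (hlow : ∀ j, 1 ≤ j → j < L' → X ^ j ≤ N) :
    ∀ (fuel M : Nat), 1 ≤ M → M ≤ L' → L' ≤ M + fuel →
      ten2AltCount fuel (N : Int) (X : Int) (M : Int) = (L' : Int) := by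
  intro fuel
  induction fuel with
  | zero =>
    intro M h1 h2 h3
    have : M = L' := by omega
    simp [ten2AltCount, this]
  | succ f ih =>
    intro M h1 h2 h3
    show (if ((X : Int)) ^ ((M : Int)).toNat ≤ (N : Int) then _ else _) = _
    rw [Int.toNat_natCast]
    by_cases hle : X ^ M ≤ N
    · rw [if_pos (by exact_mod_cast hle)]
      have hMlt : M < L' := by
        rcases Nat.lt_or_ge M L' with h | h
        · exact h
        · have : M = L' := by omega
          subst this; omega
      rw [show ((M : Int) + 1) = ((M + 1 : Nat) : Int) by push_cast; ring]
      exact ih (M + 1) (by omega) (by omega) (by omega)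
    · rw [if_neg (by exact_mod_cast hle)]
      have : M = L' := by
        rcases Nat.lt_or_ge M L' with h | h
        · exact absurd (hlow M h1 h) hle
        · omega
      exact_mod_cast congrArg (Nat.cast : Nat → Int) this

-- the padded high-to-low digit list both programs produce
theorem padded_digits_eq (X N L T : Nat) (hX : 2 ≤ X) (hL : L = (lsbD X N).length)
    (hT : L ≤ T) :
    (List.range T).map (fun j => ((N / X ^ (T - 1 - j) % X : Nat) : Int)) =
      List.replicate (T - L) 0 ++ ((lsbD X N).map (fun d : Nat => (d : Int))).reverse := by
  have hlen : (lsbD X N).length = L := hL.symm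
  apply List.ext_getElem
  · simp [hlen]; omega
  · intro j hj hj'
    simp only [List.getElem_map, List.getElem_range]
    by_cases hcase : j < T - L
    · rw [List.getElem_append_left (by simpa using hcase)]
      simp only [List.getElem_replicate]
      have hp : L ≤ T - 1 - j := by omega
      have : N < X ^ (T - 1 - j) := by
        calc N < X ^ L := hL ▸ lt_pow_len_lsbD X N hX
        _ ≤ X ^ (T - 1 - j) := Nat.pow_le_pow_right (by omega) hp
      rw [Nat.div_eq_of_lt this]
      simp
    · have hjT : j < T := by simpa using hj
      have hL1 : 1 ≤ L := by
        have := List.length_pos_of_ne_nil (lsbD_ne_nil X N); omega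
      rw [List.getElem_append_right (by simpa using hcase)]
      simp only [List.getElem_reverse, List.getElem_map, List.length_map, List.length_replicate,
        hlen]
      have hidx : L - 1 - (j - (T - L)) = T - 1 - j := by omega
      rw [← List.getD_eq_getElem (lsbD X N) 0
            (by simp at hj' ⊢; omega : L - 1 - (j - (T - L)) < (lsbD X N).length)]
      rw [hidx, lsbD_getD X N hX]

theorem lsbD_lt_100 (X N : Nat) (hX : 2 ≤ X) (h : X ≤ 100 ∨ N < 100) :
    ∀ d ∈ lsbD X N, d < 100 := by
  intro d hd
  rcases h with h | h
  · have := lsbD_lt X N hX hd; omega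
  · obtain ⟨i, hi, rfl⟩ := List.mem_iff_getElem.mp hd
    rw [← List.getD_eq_getElem _ 0 hi, lsbD_getD X N hX]
    have h1 : N / X ^ i % X ≤ N / X ^ i := Nat.mod_le _ _
    have h2 : N / X ^ i ≤ N := Nat.div_le_self _ _
    omega

theorem lookup_id (e : Int) (h0 : 0 ≤ e) (h1 : e < 100) :
    PySem.List.pyGetD (PySem.List.pyRange 0 100 1) e 0 = e := by
  rw [PySem.List.pyGetD_eq_getElem _ 0 h0 (by rw [PySem.List.length_pyRange_one]; omega)]
  rw [PySem.List.getElem_pyRange_one]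
  omega

theorem len_le_succ (X N : Nat) (hX : 2 ≤ X) : (lsbD X N).length ≤ N + 1 := by
  by_cases h : (lsbD X N).length ≤ 1
  · omega
  · have h1 : X ^ ((lsbD X N).length - 1) ≤ N :=
      pow_le_of_lt_len X N _ hX (by omega) (by omega)
    have h2 : (lsbD X N).length - 1 < 2 ^ ((lsbD X N).length - 1) := Nat.lt_two_pow_self
    have h3 : 2 ^ ((lsbD X N).length - 1) ≤ X ^ ((lsbD X N).length - 1) :=
      Nat.pow_le_pow_left hX _
    omega

-- ===== VERDICT (by name: the statement is the Claim_ definition above) =====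
theorem ten2_spec : Claim_equal_ten2 := by
  intro n x k _ hpre
  obtain ⟨hn, hx2, hor⟩ := hpre
  unfold Spec_ten2
  simp only [ten2, ten2_alt]
  have hn' : n = ((n.toNat : Nat) : Int) := (Int.toNat_of_nonneg hn).symm
  have hx' : x = ((x.toNat : Nat) : Int) := (Int.toNat_of_nonneg (by omega)).symm
  generalize hN : n.toNat = N at *
  generalize hX : x.toNat = X at *
  have hX2 : 2 ≤ X := by omega
  have hor' : X ≤ 100 ∨ N < 100 := by omega
  rw [hn', hx']
  set L : Nat := (lsbD X N).length with hLdef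
  have hL1 : 1 ≤ L := by
    have := List.length_pos_of_ne_nil (lsbD_ne_nil X N); omega
  -- A side
  rw [divLoop_eq X hX2 N (N + 1) (by omega)]
  have htemp :
      (((lsbD X N).map (fun d : Nat => (d : Int))).reverse).map
          (fun i => PySem.List.pyGetD (PySem.List.pyRange 0 100 1) i 0) =
        ((lsbD X N).map (fun d : Nat => (d : Int))).reverse := by
    have : ∀ e ∈ ((lsbD X N).map (fun d : Nat => (d : Int))).reverse,
        PySem.List.pyGetD (PySem.List.pyRange 0 100 1) e 0 = e := by
      intro e he
      rw [List.mem_reverse, List.mem_map] at he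
      obtain ⟨d, hd, rfl⟩ := he
      have := lsbD_lt_100 X N hX2 hor' d hd
      exact lookup_id _ (by positivity) (by exact_mod_cast this)
    calc (((lsbD X N).map (fun d : Nat => (d : Int))).reverse).map
            (fun i => PySem.List.pyGetD (PySem.List.pyRange 0 100 1) i 0)
        = (((lsbD X N).map (fun d : Nat => (d : Int))).reverse).map id :=
          List.map_congr_left this
      _ = _ := List.map_id _
  rw [htemp, pad_eq]
  have hlenrev : ((((lsbD X N).map (fun d : Nat => (d : Int))).reverse).length : Int) = L := by
    rw [List.length_reverse, List.length_map]
  rw [hlenrev]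
  -- B side
  have hcount : ten2AltCount (N + 1) ((N : Nat) : Int) ((X : Nat) : Int) 1 = ((L : Nat) : Int) := by
    exact_mod_cast count_eq X L hX2 N (lt_pow_len_lsbD X N hX2)
      (fun j hj1 hj2 => pow_le_of_lt_len X N j hX2 hj1 hj2) (N + 1) 1 (by omega) (by omega)
      (by have := len_le_succ X N hX2; omega)
  rw [hcount]
  rw [PySem.List.pyRange_neg_one]
  have hrange : (((L : Nat) : Int) - 1 - -1).toNat = L := by omega
  rw [hrange, List.map_map]
  have hmapB :
      (List.range L).map
          ((fun p => PySem.Int.mod (PySem.Int.floordiv ((N : Nat) : Int) (((X : Nat) : Int) ^ p.toNat)) ((X : Nat) : Int)) ∘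
            (fun j : Nat => ((L : Nat) : Int) - 1 - (j : Int))) =
        (List.range L).map (fun j => ((N / X ^ (L - 1 - j) % X : Nat) : Int)) := by
    apply List.map_congr_left
    intro j hj
    rw [List.mem_range] at hj
    simp only [Function.comp]
    have hp : ((L : Nat) : Int) - 1 - (j : Int) = (((L - 1 - j : Nat) : Nat) : Int) := by
      push_cast; omega
    rw [hp, Int.toNat_natCast]
    rw [show (((X : Nat) : Int)) ^ (L - 1 - j) = (((X ^ (L - 1 - j) : Nat) : Nat) : Int) by
      push_cast; ring]
    rw [PySem.Int.floordiv_natCast, PySem.Int.mod_natCast]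
  rw [hmapB, padded_digits_eq X N L L hX2 hLdef (le_refl L)]
  rw [Nat.sub_self, List.replicate_zero, List.nil_append]
  have hpadcount : (k - (L : Int)).toNat = (max ((L : Nat) : Int) k - (L : Nat)).toNat := by omega
  rw [hpadcount]
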